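-- pv_equiv track=rewrite | github.com/oanalavinia/Magazines_metadata_filling | modules/features.py | no_of_rows
-- ===== SOURCE A (Python) =====
-- def no_of_rows(section_text):
--     c = 0
--
--     section_text = section_text.replace(" ", "")
--
--     for i in range(0, len(section_text) - 1):
--         if section_text[i] == '\n':
--             if section_text[i + 1] == '\n':
--                 c = c + 1
--
--     return len(section_text.split('\n')) - c
-- ===== SOURCE B (Python) =====
-- def no_of_rows(section_text):
--     t = section_text.replace(" ", "")
--     runs = 0
--     prev_nl = False
--     for ch in t:
--         if ch == '\n' and not prev_nl:
--             runs += 1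
--         prev_nl = (ch == '\n')
--     return runs + 1
-- ===== Notes on version B (the rewrite author's own statement) =====
-- stated objective: simpler
-- what changed: Instead of building split('\n') and separately counting adjacent newline pairs with an index loop, B makes one pass over the space-stripped text counting maximal runs of '\n' and returns runs + 1.
import Mathlib
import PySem

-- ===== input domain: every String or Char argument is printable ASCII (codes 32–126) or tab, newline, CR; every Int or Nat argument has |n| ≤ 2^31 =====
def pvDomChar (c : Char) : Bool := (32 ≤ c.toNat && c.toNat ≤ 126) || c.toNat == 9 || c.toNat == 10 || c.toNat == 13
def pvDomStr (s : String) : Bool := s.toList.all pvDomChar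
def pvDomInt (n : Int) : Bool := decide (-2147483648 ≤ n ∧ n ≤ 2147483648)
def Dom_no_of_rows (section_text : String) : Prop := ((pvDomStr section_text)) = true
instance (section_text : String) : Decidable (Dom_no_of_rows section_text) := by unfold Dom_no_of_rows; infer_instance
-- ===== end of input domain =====

-- B replaces A's split-then-count-adjacent-pairs arithmetic with a single pass counting maximal runs of '\n' (returns runs + 1); simpler, same return value.

-- ===== PORT A =====
def no_of_rows (section_text : String) : Int :=
  let t := PySem.Str.replace section_text " " ""
  let c : Int := (PySem.List.pyRange 0 (PySem.Str.len t - 1) 1).foldl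
    (fun c i =>
      if PySem.Str.pyGet? t i = some '\n' then
        if PySem.Str.pyGet? t (i + 1) = some '\n' then c + 1 else c
      else c) 0
  (((PySem.Str.split? t "\n").getD []).length : Int) - c

-- ===== PORT B =====
def no_of_rows_alt (section_text : String) : Int :=
  let t := PySem.Str.replace section_text " " ""
  let st := t.toList.foldl
    (fun (st : Int × Bool) ch =>
      ((if ch = '\n' ∧ st.2 = false then st.1 + 1 else st.1), ch == '\n')) (0, false)
  st.1 + 1

-- ===== PRECONDITION & SPEC =====
def Spec_no_of_rows (section_text : String) (out : Int) : Prop := out = no_of_rows_alt section_text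
instance (section_text : String) (out : Int) : Decidable (Spec_no_of_rows section_text out) := by unfold Spec_no_of_rows; infer_instance

-- ===== CLAIM (what is proved, stated in full; the proofs are below) =====
def Claim_equal_no_of_rows : Prop := ∀ (section_text : String), Dom_no_of_rows section_text → Spec_no_of_rows section_text (no_of_rows section_text)

-- ===== LEMMAS AND PROOFS =====

/-- adjacent-'\n'-pair count of `l`, extended with a flag saying whether the char before `l` was '\n'. -/
def pairsE : Bool → List Char → Nat
  | _, [] => 0
  | prev, c :: cs => (if prev ∧ c = '\n' then 1 else 0) + pairsE (c == '\n') cs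

-- splitOn with a single-char separator yields count + 1 pieces
lemma length_splitOn_go (fuel : Nat) :
    ∀ (l cur : List Char) (acc : List (List Char)), l.length < fuel →
      (PySem.Chars.splitOn.go ['\n'] fuel l cur acc).length = acc.length + l.count '\n' + 1 := by
  induction fuel with
  | zero => intro l cur acc h; omega
  | succ fuel ih =>
    intro l cur acc h
    cases l with
    | nil => simp [PySem.Chars.splitOn.go]
    | cons c rest =>
      by_cases hc : c = '\n'
      · subst hc
        rw [show PySem.Chars.splitOn.go ['\n'] (fuel + 1) ('\n' :: rest) cur acc
              = PySem.Chars.splitOn.go ['\n'] fuel rest [] (cur.reverse :: acc) by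
            simp [PySem.Chars.splitOn.go]]
        rw [ih rest [] (cur.reverse :: acc) (by simpa using Nat.lt_of_succ_lt_succ h)]
        simp
        omega
      · rw [show PySem.Chars.splitOn.go ['\n'] (fuel + 1) (c :: rest) cur acc
              = PySem.Chars.splitOn.go ['\n'] fuel rest (c :: cur) acc by
            simp [PySem.Chars.splitOn.go, List.isPrefixOf, Ne.symm hc]]
        rw [ih rest (c :: cur) acc (by simpa using Nat.lt_of_succ_lt_succ h)]
        simp [hc]

lemma length_splitOn (l : List Char) :
    (PySem.Chars.splitOn l ['\n']).length = l.count '\n' + 1 := by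
  have := length_splitOn_go (l.length + 1) l [] [] (by omega)
  simpa [PySem.Chars.splitOn] using this

-- the index loop of A counts exactly the extended pair count (with the head handled separately)
lemma countP_range_pairs (l : List Char) : ∀ (a : Char),
    List.countP (fun k => decide ((a :: l)[k]? = some '\n') && decide ((a :: l)[k + 1]? = some '\n'))
      (List.range l.length) = pairsE (a == '\n') l := by
  induction l with
  | nil => intro a; simp [pairsE]
  | cons b cs ih =>
    intro a
    rw [show (b :: cs).length = cs.length + 1 from rfl, List.range_succ_eq_map]
    rw [List.countP_cons, List.countP_map]
    have : (List.countP ((fun k => decide ((a :: b :: cs)[k]? = some '\n') &&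
            decide ((a :: b :: cs)[k + 1]? = some '\n')) ∘ (fun i => i + 1)) (List.range cs.length))
        = List.countP (fun k => decide ((b :: cs)[k]? = some '\n') &&
            decide ((b :: cs)[k + 1]? = some '\n')) (List.range cs.length) := by
      apply List.countP_congr
      intro k _
      simp [Function.comp]
    rw [this, ih b]
    by_cases ha : a = '\n' <;> by_cases hb : b = '\n' <;>
      simp [pairsE, ha, hb] <;> omega

-- B's invariant: newlines split into run-starts and pair-continuations
lemma foldB_inv (l : List Char) : ∀ (prev : Bool) (r : Int),
    (l.foldl (fun (st : Int × Bool) ch =>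
        ((if ch = '\n' ∧ st.2 = false then st.1 + 1 else st.1), ch == '\n')) (r, prev)).1
      + (pairsE prev l : Int) = r + (l.count '\n' : Int) := by
  induction l with
  | nil => intro prev r; simp [pairsE]
  | cons c cs ih =>
    intro prev r
    simp only [List.foldl_cons, pairsE, List.count_cons]
    have h := ih (c == '\n') (if c = '\n' ∧ prev = false then r + 1 else r)
    by_cases hc : c = '\n' <;> cases prev <;>
      simp [hc] at h ⊢ <;> omega

lemma main_list (t : String) :
    (((PySem.Str.split? t "\n").getD []).length : Int)
      - (PySem.List.pyRange 0 (PySem.Str.len t - 1) 1).foldl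
          (fun c i =>
            if PySem.Str.pyGet? t i = some '\n' then
              if PySem.Str.pyGet? t (i + 1) = some '\n' then c + 1 else c
            else c) 0
    = (t.toList.foldl
        (fun (st : Int × Bool) ch =>
          ((if ch = '\n' ∧ st.2 = false then st.1 + 1 else st.1), ch == '\n')) (0, false)).1 + 1 := by
  have hsplit : PySem.Str.split? t "\n"
      = some ((PySem.Chars.splitOn t.toList ['\n']).map String.ofList) := by
    simp [PySem.Str.split?, PySem.Chars.split?]
  rw [hsplit]
  have hfun : (fun (c : Int) (i : Int) =>
        if PySem.Str.pyGet? t i = some '\n' then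
          if PySem.Str.pyGet? t (i + 1) = some '\n' then c + 1 else c
        else c)
      = (fun (c : Int) (i : Int) =>
        if PySem.Str.pyGet? t i = some '\n' ∧ PySem.Str.pyGet? t (i + 1) = some '\n' then c + 1
        else c) := by
    funext c i; split_ifs <;> tauto
  rw [hfun, PySem.List.foldl_ite_add_one
    (fun i => PySem.Str.pyGet? t i = some '\n' ∧ PySem.Str.pyGet? t (i + 1) = some '\n')]
  rw [PySem.List.pyRange_one, List.countP_map]
  have hlen : PySem.Str.len t = (t.toList.length : Int) := by simp
  rw [hlen]
  have hB := foldB_inv t.toList false 0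
  cases hl : t.toList with
  | nil =>
    simp [hl, PySem.Chars.splitOn, PySem.Chars.splitOn.go]
  | cons a ls =>
    have hcnt : List.countP
        ((fun i => decide (PySem.Str.pyGet? t i = some '\n' ∧ PySem.Str.pyGet? t (i + 1) = some '\n'))
          ∘ fun k => (0 : Int) + ↑k)
        (List.range (((a :: ls).length : Int) - 1 - 0).toNat)
        = pairsE (a == '\n') ls := by
      have hrange : ((((a :: ls).length : Int)) - 1 - 0).toNat = ls.length := by
        simp
      rw [hrange, ← countP_range_pairs ls a]
      apply List.countP_congr
      intro k _
      simp [Function.comp, hl]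
    rw [hcnt]
    rw [hl] at hB
    have hlenS : (PySem.Chars.splitOn (a :: ls) ['\n']).length = (a :: ls).count '\n' + 1 :=
      length_splitOn (a :: ls)
    simp only [Option.getD_some, List.length_map, hlenS]
    have hp : pairsE false (a :: ls) = pairsE (a == '\n') ls := by simp [pairsE]
    rw [hp] at hB
    push_cast at hB ⊢
    omega

-- ===== VERDICT (by name: the statement is the Claim_ definition above) =====
set_option maxHeartbeats 1000000 in
theorem no_of_rows_spec : Claim_equal_no_of_rows := by
  intro s _
  show no_of_rows s = no_of_rows_alt s
  rw [no_of_rows, no_of_rows_alt]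
  exact main_list (PySem.Str.replace s " " "")
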